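-- pv_equiv track=rewrite | github.com/kbrodt/inbetweening | occlusion_mask_nn/dataset/rendering_smpl.py | is_part_of_skeleton
-- ===== SOURCE A (Python) =====
-- def is_part_of_skeleton(name, skeleton_bones, not_skeleton_bones):
--     for b in skeleton_bones:
--         if b not in name:
--             continue
--
--         for nb in not_skeleton_bones:
--             if nb in name:
--                 break
--         else:
--             return True
--
--     return False
-- ===== SOURCE B (Python) =====
-- def is_part_of_skeleton(name, skeleton_bones, not_skeleton_bones):
--     return any(b in name for b in skeleton_bones) and not any(
--         nb in name for nb in not_skeleton_bones
--     )
-- ===== Notes on version B (the rewrite author's own statement) =====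
-- stated objective: faster
-- what changed: A nests the excluded-bone for/else loop inside the skeleton loop, re-running it for every matching bone; B computes two flat independent any() passes and combines them with 'and not', exploiting that the inner check does not depend on the outer bone.
import Mathlib
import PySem

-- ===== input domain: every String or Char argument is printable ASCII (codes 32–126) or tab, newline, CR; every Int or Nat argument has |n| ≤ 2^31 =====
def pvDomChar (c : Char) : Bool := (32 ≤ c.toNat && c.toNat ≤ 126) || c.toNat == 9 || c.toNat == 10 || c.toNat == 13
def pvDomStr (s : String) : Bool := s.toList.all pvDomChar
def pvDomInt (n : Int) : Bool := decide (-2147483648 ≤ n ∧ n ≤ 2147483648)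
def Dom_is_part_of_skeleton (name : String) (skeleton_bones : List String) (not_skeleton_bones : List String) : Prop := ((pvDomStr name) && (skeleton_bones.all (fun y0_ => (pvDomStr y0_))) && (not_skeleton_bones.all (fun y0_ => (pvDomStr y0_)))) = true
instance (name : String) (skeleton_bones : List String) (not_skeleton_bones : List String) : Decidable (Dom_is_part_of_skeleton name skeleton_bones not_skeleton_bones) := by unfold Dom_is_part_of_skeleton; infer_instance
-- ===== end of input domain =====

-- B replaces A's nested loops (the excluded-bone scan re-run for every matching skeleton bone) by two independent flat passes combined with 'and not' — O(s+e) substring checks instead of O(s*e).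


-- ===== PORT A =====
-- inner for/else over not_skeleton_bones: true = the loop finished without break (return True)
def ipos_inner (name : String) : List String → Bool
  | [] => true
  | nb :: rest => if PySem.Str.isIn nb name then false else ipos_inner name rest

def is_part_of_skeleton (name : String) (skeleton_bones : List String) (not_skeleton_bones : List String) : Bool :=
  match skeleton_bones with
  | [] => false
  | b :: rest =>
    if !(PySem.Str.isIn b name) then
      is_part_of_skeleton name rest not_skeleton_bones
    else if ipos_inner name not_skeleton_bones then
      true
    else
      is_part_of_skeleton name rest not_skeleton_bones

-- ===== PORT B =====
def is_part_of_skeleton_alt (name : String) (skeleton_bones : List String) (not_skeleton_bones : List String) : Bool :=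
  (skeleton_bones.any (fun b => PySem.Str.isIn b name)) &&
    !(not_skeleton_bones.any (fun nb => PySem.Str.isIn nb name))

-- ===== PRECONDITION & SPEC =====
def Spec_is_part_of_skeleton (name : String) (skeleton_bones : List String) (not_skeleton_bones : List String) (out : Bool) : Prop := out = is_part_of_skeleton_alt name skeleton_bones not_skeleton_bones
instance (name : String) (skeleton_bones : List String) (not_skeleton_bones : List String) (out : Bool) : Decidable (Spec_is_part_of_skeleton name skeleton_bones not_skeleton_bones out) := by unfold Spec_is_part_of_skeleton; infer_instance

-- ===== CLAIM (what is proved, stated in full; the proofs are below) =====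
def Claim_equal_is_part_of_skeleton : Prop := ∀ (name : String) (skeleton_bones : List String) (not_skeleton_bones : List String), Dom_is_part_of_skeleton name skeleton_bones not_skeleton_bones → Spec_is_part_of_skeleton name skeleton_bones not_skeleton_bones (is_part_of_skeleton name skeleton_bones not_skeleton_bones)

-- ===== LEMMAS AND PROOFS =====

lemma ipos_inner_eq_not_any (name : String) (ns : List String) :
    ipos_inner name ns = !(ns.any (fun nb => PySem.Str.isIn nb name)) := by
  induction ns with
  | nil => rfl
  | cons nb rest ih =>
    simp only [ipos_inner, List.any_cons]
    by_cases h : PySem.Chars.isIn nb.toList name.toList = true <;> simp [h, ih]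

lemma ipos_eq_alt (name : String) (sk ns : List String) :
    is_part_of_skeleton name sk ns = is_part_of_skeleton_alt name sk ns := by
  induction sk with
  | nil => rfl
  | cons b rest ih =>
    simp only [is_part_of_skeleton, is_part_of_skeleton_alt, List.any_cons,
      ipos_inner_eq_not_any] at ih ⊢
    cases hb : PySem.Str.isIn b name <;>
      cases hn : ns.any (fun nb => PySem.Str.isIn nb name) <;>
      simp only [hb, hn, ih, Bool.not_false, Bool.not_true, Bool.false_or, Bool.true_or,
        Bool.and_true, Bool.and_false, Bool.true_and, Bool.false_and, if_true, if_false,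
        ite_true, ite_false] <;> simp

-- ===== VERDICT =====
theorem is_part_of_skeleton_spec : Claim_equal_is_part_of_skeleton := by
  intro name sk ns _
  unfold Spec_is_part_of_skeleton
  exact ipos_eq_alt name sk ns
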